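-- pv_equiv track=rewrite | github.com/yeoeol/Algo | 백준/Silver/1283. 단축키 지정/단축키 지정.py | solution
-- ===== SOURCE A (Python) =====
-- def solution(sets, s):
--     split = s.split()
--     idx = 0
--     flag = False
--     # 단어의 첫 글자가 sets에 없다면 sets에 넣고 몇 번째 단어인지 인덱스 저장
--     for i, word in enumerate(split):
--         if word[0].upper() not in sets:
--             idx = i
--             flag = True
--             break
--     # 첫 번째 글자 단축키 지정
--     arr = []
--     if flag:
--         for i, word in enumerate(split):
--             if i == idx:
--                 sets.add(word[0].upper())
--                 arr.append("["+word[0]+"]"+word[1:])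
--             else:
--                 arr.append(word)
--         return arr
--     else:
--         # 왼쪽에서부터 차례대로 알파벳 순회, 단축키로 지정안된 것이 있다면 지정
--         flag = False
--         for i, word in enumerate(split):
--             temp = ""
--             for j in range(len(word)):
--                 if not flag and word[j].upper() not in sets:
--                     sets.add(word[j].upper())
--                     temp += "["+word[j]+"]"
--                     flag = True
--                 else:
--                     temp += word[j]
--             arr.append(temp)
--         return arr
-- ===== SOURCE B (Python) =====
-- def solution(sets, s):
--     words = s.split()
--     # find the single target position (word index, char index), preferring first letters
--     target = None
--     for i, w in enumerate(words):
--         if w[0].upper() not in sets: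
--             target = (i, 0)
--             break
--     if target is None:
--         for i, w in enumerate(words):
--             for j, ch in enumerate(w):
--                 if ch.upper() not in sets:
--                     target = (i, j)
--                     break
--             if target is not None:
--                 break
--     if target is None:
--         return list(words)
--     wi, ci = target
--     res = [w if i != wi else w[:ci] + "[" + w[ci] + "]" + w[ci + 1:]
--            for i, w in enumerate(words)]
--     sets.add(words[wi][ci].upper())
--     return res
-- ===== Notes on version B (the rewrite author's own statement) =====
-- stated objective: simpler
-- what changed: A builds the result inside two separate formatting branches (a marked-word loop for the first-letter case and a char-by-char temp-string loop with a threaded flag for the fallback case); B first computes a single target position (word index, char index) and then formats the word list in one slicing pass, with no flag threading.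
import Mathlib
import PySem

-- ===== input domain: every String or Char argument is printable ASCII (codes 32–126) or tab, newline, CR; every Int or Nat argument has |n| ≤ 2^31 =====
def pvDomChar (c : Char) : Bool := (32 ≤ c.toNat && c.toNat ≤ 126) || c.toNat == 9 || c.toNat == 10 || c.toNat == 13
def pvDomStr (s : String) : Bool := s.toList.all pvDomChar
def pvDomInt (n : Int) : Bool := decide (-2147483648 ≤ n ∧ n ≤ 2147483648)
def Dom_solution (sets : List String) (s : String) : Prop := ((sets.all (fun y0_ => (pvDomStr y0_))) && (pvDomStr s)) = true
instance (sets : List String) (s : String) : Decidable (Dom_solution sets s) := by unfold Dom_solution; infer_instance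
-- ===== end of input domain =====

-- B replaces A's two result-building branches by first computing one target position
-- (word index, char index) and then formatting the word list in a single pass (objective: simpler).
-- A mutates its 'sets' argument in place (set.add); B performs the same mutation in Python;
-- the equivalence proved here is about the RETURN value only.
-- split() never yields an empty word, so Python's word[0] cannot raise; the ports' empty-word
-- branches are unreachable on split output.

-- ===== PORT A =====
-- membership test 'word[j].upper() not in sets' (upper of a 1-char string)
def aAvail (sets : List String) (c : Char) : Bool :=
  !(sets.contains (String.ofList [PySem.Chars.upperChar c]))

-- first loop: first i with word[0].upper() not in sets (enumerate + break)
def aFindIdx (sets : List String) (i : Nat) : List String → Option Nat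
  | [] => none
  | w :: rest =>
    match w.toList with
    | [] => aFindIdx sets (i + 1) rest          -- unreachable on split output
    | c :: _ => if aAvail sets c then some i else aFindIdx sets (i + 1) rest

-- the 'if flag' loop: bracket the first char of word idx, keep the rest
def aMark1 (idx : Nat) (i : Nat) : List String → List String
  | [] => []
  | w :: rest =>
    (if i = idx then
      match w.toList with
      | [] => w                                  -- unreachable on split output
      | c :: cs => "[" ++ String.ofList [c] ++ "]" ++ String.ofList cs
     else w) :: aMark1 idx (i + 1) rest

-- inner loop of the else-branch: build temp char by char, flag threaded through
-- (A's sets.add is never read again after flag becomes True, so sets is not threaded)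
def aInner (sets : List String) (flag : Bool) : List Char → Bool × List Char
  | [] => (flag, [])
  | c :: rest =>
    if !flag && aAvail sets c then
      let (f, t) := aInner sets true rest
      (f, '[' :: c :: ']' :: t)
    else
      let (f, t) := aInner sets flag rest
      (f, c :: t)

-- outer loop of the else-branch
def aOuter (sets : List String) (flag : Bool) : List String → List String
  | [] => []
  | w :: rest =>
    let (f, t) := aInner sets flag w.toList
    String.ofList t :: aOuter sets f rest

def solution (sets : List String) (s : String) : List String :=
  let split := PySem.Str.split₀ s
  match aFindIdx sets 0 split with
  | some idx => aMark1 idx 0 split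
  | none => aOuter sets false split

-- ===== PORT B =====
-- membership test 'ch.upper() not in sets' (B side)
def bAvail (sets : List String) (c : Char) : Bool :=
  !(sets.contains (String.ofList [PySem.Chars.upperChar c]))

-- earliest word whose FIRST letter is available
def bScanFirst (sets : List String) : List String → Option Nat
  | [] => none
  | w :: rest =>
    match w.toList with
    | [] => (bScanFirst sets rest).map (· + 1)   -- unreachable on split output
    | c :: _ => if bAvail sets c then some 0 else (bScanFirst sets rest).map (· + 1)

-- first available char position inside one word
def bScanWord (sets : List String) : List Char → Option Nat
  | [] => none
  | c :: rest => if bAvail sets c then some 0 else (bScanWord sets rest).map (· + 1)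

-- first (word, char) position over all words
def bScanAll (sets : List String) : List String → Option (Nat × Nat)
  | [] => none
  | w :: rest =>
    match bScanWord sets w.toList with
    | some j => some (0, j)
    | none => (bScanAll sets rest).map (fun p => (p.1 + 1, p.2))

-- w[:ci] + "[" + w[ci] + "]" + w[ci+1:]
def bMark (w : String) (ci : Nat) : String :=
  match (w.toList).drop ci with
  | [] => w                                      -- unreachable: ci is always in range
  | c :: rest => String.ofList ((w.toList).take ci ++ '[' :: c :: ']' :: rest)

-- the result comprehension over enumerate(words)
def bBuild (wi ci : Nat) (i : Nat) : List String → List String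
  | [] => []
  | w :: rest => (if i = wi then bMark w ci else w) :: bBuild wi ci (i + 1) rest

def solution_alt (sets : List String) (s : String) : List String :=
  let words := PySem.Str.split₀ s
  let target : Option (Nat × Nat) :=
    match bScanFirst sets words with
    | some i => some (i, 0)
    | none => bScanAll sets words
  match target with
  | none => words
  | some (wi, ci) => bBuild wi ci 0 words

-- ===== PRECONDITION & SPEC =====
def Spec_solution (sets : List String) (s : String) (out : List String) : Prop := out = solution_alt sets s
instance (sets : List String) (s : String) (out : List String) : Decidable (Spec_solution sets s out) := by unfold Spec_solution; infer_instance

-- ===== CLAIM (what is proved, stated in full; the proofs are below) =====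
def Claim_equal_solution : Prop := ∀ (sets : List String) (s : String), Dom_solution sets s → Spec_solution sets s (solution sets s)

-- ===== LEMMAS AND PROOFS =====

theorem bAvail_eq (sets : List String) (c : Char) : bAvail sets c = aAvail sets c := rfl

theorem aFindIdx_eq (sets : List String) (ws : List String) (i : Nat) :
    aFindIdx sets i ws = (bScanFirst sets ws).map (· + i) := by
  induction ws generalizing i with
  | nil => rfl
  | cons w rest ih =>
    simp only [aFindIdx, bScanFirst, bAvail_eq]
    cases h : w.toList with
    | nil =>
      simp only [ih, Option.map_map]
      congr 1; funext x; simp; omega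
    | cons c cs =>
      by_cases hc : aAvail sets c = true
      · simp [hc]
      · simp only [hc, if_neg, Bool.false_eq_true, if_false, ih, Option.map_map]
        congr 1; funext x; simp; omega

theorem aMark1_eq_bBuild (idx i : Nat) (ws : List String) :
    aMark1 idx i ws = bBuild idx 0 i ws := by
  induction ws generalizing i with
  | nil => rfl
  | cons w rest ih =>
    simp only [aMark1, bBuild, ih]
    congr 1
    by_cases h : i = idx
    · simp only [h, if_pos rfl, bMark]
      cases hw : w.toList with
      | nil => simp [hw]
      | cons c cs =>
        rw [← String.toList_inj]
        simp
    · simp [h]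

theorem aInner_true (sets : List String) (cs : List Char) :
    aInner sets true cs = (true, cs) := by
  induction cs with
  | nil => rfl
  | cons c rest ih => simp [aInner, ih]

theorem aInner_false (sets : List String) (cs : List Char) :
    aInner sets false cs =
      match bScanWord sets cs with
      | none => (false, cs)
      | some j =>
        (true, cs.take j ++ '[' :: (cs.drop j).headD ' ' :: ']' :: cs.drop (j + 1)) := by
  induction cs with
  | nil => rfl
  | cons c rest ih =>
    simp only [aInner, bScanWord, bAvail_eq]
    by_cases hc : aAvail sets c = true
    · simp [hc, aInner_true]
    · simp only [hc, Bool.false_and, if_neg, Bool.and_false]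
      simp only [Bool.not_eq_true] at hc
      simp [hc, ih]
      cases h : bScanWord sets rest with
      | none => simp
      | some j => simp

theorem bBuild_of_lt (wi ci i : Nat) (h : wi < i) (ws : List String) :
    bBuild wi ci i ws = ws := by
  induction ws generalizing i with
  | nil => rfl
  | cons w rest ih =>
    simp only [bBuild]
    rw [if_neg (by omega), ih (i + 1) (by omega)]

theorem aOuter_true (sets : List String) (ws : List String) :
    aOuter sets true ws = ws := by
  induction ws with
  | nil => rfl
  | cons w rest ih => simp [aOuter, aInner_true, ih]

theorem bScanWord_lt (sets : List String) (cs : List Char) (j : Nat)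
    (h : bScanWord sets cs = some j) : j < cs.length := by
  induction cs generalizing j with
  | nil => simp [bScanWord] at h
  | cons c rest ih =>
    simp only [bScanWord, bAvail_eq] at h
    by_cases hc : aAvail sets c = true
    · simp [hc] at h
      simp [List.length_cons]
      omega
    · simp [hc] at h
      obtain ⟨j', hj', rfl⟩ := h
      have := ih j' hj'
      simp [List.length_cons]
      omega

theorem aOuter_false (sets : List String) (ws : List String) (i : Nat) :
    aOuter sets false ws =
      match bScanAll sets ws with
      | none => ws
      | some p => bBuild (p.1 + i) p.2 i ws := by
  induction ws generalizing i with
  | nil => rfl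
  | cons w rest ih =>
    simp only [aOuter, bScanAll, aInner_false sets w.toList]
    cases hw : bScanWord sets w.toList with
    | none =>
      simp only []
      rw [ih (i + 1)]
      cases h : bScanAll sets rest with
      | none => simp [bBuild]
      | some p =>
        simp only [Option.map_some, bBuild]
        rw [if_neg (show ¬ i = p.1 + 1 + i by omega),
            show p.1 + (i + 1) = p.1 + 1 + i by omega]
        simp
    | some j =>
      simp only []
      rw [aOuter_true]
      have hj : j < w.toList.length := bScanWord_lt sets _ j hw
      obtain ⟨c, cs', hd⟩ : ∃ c cs', w.toList.drop j = c :: cs' := by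
        cases h : w.toList.drop j with
        | nil => rw [List.drop_eq_nil_iff] at h; omega
        | cons a b => exact ⟨a, b, rfl⟩
      have hd1 : w.toList.drop (j + 1) = cs' := by
        rw [← List.tail_drop, hd]; rfl
      simp only [bBuild]
      rw [if_pos (by omega)]
      congr 1
      · simp [bMark, hd, hd1]
      · exact (bBuild_of_lt (0 + i) j (i + 1) (by omega) rest).symm

-- ===== VERDICT (by name: the statement is the Claim_ definition above) =====
theorem solution_spec : Claim_equal_solution := by
  intro sets s _
  unfold Spec_solution solution solution_alt
  simp only []
  rw [aFindIdx_eq]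
  cases h : bScanFirst sets (PySem.Str.split₀ s) with
  | some idx => simp [aMark1_eq_bBuild]
  | none =>
    simp only [Option.map_none]
    rw [aOuter_false sets _ 0]
    cases h2 : bScanAll sets (PySem.Str.split₀ s) with
    | none => rfl
    | some p => simp
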